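-- pv_equiv track=rewrite | github.com/TuquiSierra/Ehealth | tagger.py | get_word_number_per_index
-- ===== SOURCE A (Python) =====
-- def get_word_number_per_index(text):
--     word_number_per_index = [0 for _ in range(len(text))]
--     actual_word_number = 0
--     previous_was_space = False
--     for index, letter in enumerate(text):
--         if letter == ' ':
--             previous_was_space = True
--         else:
--             if previous_was_space:
--                 actual_word_number += 1
--                 previous_was_space = False
--             word_number_per_index[index] = actual_word_number
--     return word_number_per_index
-- ===== SOURCE B (Python) =====
-- def get_word_number_per_index(text):
--     n = len(text)
--     out = [0] * n
--     word = 0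
--     seen_space = False
--     i = 0
--     while i < n:
--         j = i
--         if text[i] == ' ':
--             while j < n and text[j] == ' ':
--                 j += 1
--             seen_space = True
--         else:
--             while j < n and text[j] != ' ':
--                 j += 1
--             if seen_space:
--                 word += 1
--                 seen_space = False
--             out[i:j] = [word] * (j - i)
--         i = j
--     return out
-- ===== Notes on version B (the rewrite author's own statement) =====
-- stated objective: alternative
-- what changed: B traverses the string run by run (maximal space / non-space runs found with inner while scans) and fills each non-space run's slice with its word number at once, instead of A's per-character loop with a previous_was_space flag and one assignment per character.
import Mathlib
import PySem

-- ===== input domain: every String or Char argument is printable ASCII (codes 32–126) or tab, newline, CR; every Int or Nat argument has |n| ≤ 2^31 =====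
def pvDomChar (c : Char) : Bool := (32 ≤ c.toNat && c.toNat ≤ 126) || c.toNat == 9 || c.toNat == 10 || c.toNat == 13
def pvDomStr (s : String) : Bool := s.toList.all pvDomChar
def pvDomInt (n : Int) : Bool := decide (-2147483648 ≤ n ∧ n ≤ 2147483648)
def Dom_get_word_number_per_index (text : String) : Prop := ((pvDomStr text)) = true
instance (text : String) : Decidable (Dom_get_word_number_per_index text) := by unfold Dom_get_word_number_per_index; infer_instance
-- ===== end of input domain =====

-- B replaces A's per-character loop with a previous_was_space flag by a run-based
-- traversal (maximal space / non-space runs), filling each non-space run's slice at once.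

-- ===== PORT A =====
-- literal port: zero list, then one pass over enumerate(text) with (word, previous_was_space) state
def get_word_number_per_index (text : String) : List Int :=
  let init : List Int := (PySem.List.pyRange 0 (PySem.Str.len text) 1).map (fun _ => (0 : Int))
  let r := (PySem.List.enumerate text.toList 0).foldl
    (fun (st : List Int × Int × Bool) (p : Int × Char) =>
      if p.2 == ' ' then (st.1, st.2.1, true)
      else
        let w := if st.2.2 then st.2.1 + 1 else st.2.1
        (PySem.List.pySetD st.1 p.1 w, w, false))
    (init, 0, false)
  r.1

-- ===== PORT B =====
-- run-based recursion: the inner `while` scans of Source B become takeWhile/dropWhile on the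
-- remaining characters; each run contributes its whole slice of the output at once.
def pvRunsB : List Char → Int → Bool → List Int
  | [], _, _ => []
  | c :: rest, word, seen =>
    if h : (c == ' ') = true then
      ((c :: rest).takeWhile (fun x => x == ' ')).map (fun _ => (0 : Int)) ++
        pvRunsB ((c :: rest).dropWhile (fun x => x == ' ')) word true
    else
      let w := if seen then word + 1 else word
      ((c :: rest).takeWhile (fun x => x != ' ')).map (fun _ => w) ++
        pvRunsB ((c :: rest).dropWhile (fun x => x != ' ')) w false
  termination_by l _ _ => l.length
  decreasing_by
  · simp only [List.dropWhile_cons, h, if_true]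
    exact Nat.lt_succ_of_le (List.length_dropWhile_le _ _)
  · have hc : (c != ' ') = true := by simpa using h
    simp only [List.dropWhile_cons, hc, if_true]
    exact Nat.lt_succ_of_le (List.length_dropWhile_le _ _)

def get_word_number_per_index_alt (text : String) : List Int :=
  pvRunsB text.toList 0 false

-- ===== PRECONDITION & SPEC =====
def Spec_get_word_number_per_index (text : String) (out : List Int) : Prop := out = get_word_number_per_index_alt text
instance (text : String) (out : List Int) : Decidable (Spec_get_word_number_per_index text out) := by unfold Spec_get_word_number_per_index; infer_instance

-- ===== CLAIM (what is proved, stated in full; the proofs are below) =====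
def Claim_equal_get_word_number_per_index : Prop := ∀ (text : String), Dom_get_word_number_per_index text → Spec_get_word_number_per_index text (get_word_number_per_index text)

-- ===== LEMMAS AND PROOFS =====

-- per-character reference recursion, the common ground of both proofs
def pvSpecF : List Char → Int → Bool → List Int
  | [], _, _ => []
  | c :: rest, w, prev =>
    if c == ' ' then (0 : Int) :: pvSpecF rest w true
    else
      let w' := if prev then w + 1 else w
      w' :: pvSpecF rest w' false

-- pvSpecF over a maximal space run: one 0 per space, flag ends up true
theorem specF_space_run : ∀ (l : List Char) (c : Char) (w : Int) (p : Bool), c = ' ' →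
    pvSpecF (c :: l) w p =
      ((c :: l).takeWhile (fun x => x == ' ')).map (fun _ => (0 : Int)) ++
        pvSpecF ((c :: l).dropWhile (fun x => x == ' ')) w true := by
  intro l
  induction l with
  | nil => intro c w p hc; subst hc; simp [pvSpecF]
  | cons r rs ih =>
    intro c w p hc; subst hc
    by_cases hr : r = ' '
    · have := ih r w true hr
      simp [pvSpecF, hr] at this ⊢
      simpa [pvSpecF, hr] using this
    · simp [pvSpecF, hr]

-- pvSpecF over a maximal word run with prev=false: the current word number everywhere
theorem specF_word_run : ∀ (l : List Char) (c : Char) (w : Int), ¬ c = ' ' →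
    pvSpecF (c :: l) w false =
      ((c :: l).takeWhile (fun x => x != ' ')).map (fun _ => w) ++
        pvSpecF ((c :: l).dropWhile (fun x => x != ' ')) w false := by
  intro l
  induction l with
  | nil => intro c w hc; simp [pvSpecF, hc]
  | cons r rs ih =>
    intro c w hc
    by_cases hr : r = ' '
    · simp [pvSpecF, hc, hr]
    · have := ih r w hr
      simp [pvSpecF, hc, hr] at this ⊢
      simpa [pvSpecF, hr] using this

theorem pvRunsB_eq_specF : ∀ (l : List Char) (w : Int) (s : Bool), pvRunsB l w s = pvSpecF l w s := by
  intro l w s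
  induction l, w, s using pvRunsB.induct with
  | case1 w s => simp [pvRunsB, pvSpecF]
  | case2 c rest w s h ih =>
    have hc : c = ' ' := by simpa using h
    rw [pvRunsB, dif_pos h, ih, specF_space_run rest c w s hc]
  | case3 c rest w s h w2 ih =>
    have hc : ¬ c = ' ' := by simpa using h
    have hw2 : w2 = if s then w + 1 else w := by
      by_cases hs : s <;> simp [w2, hs]
    rw [pvRunsB, dif_neg h]
    simp only [← hw2]
    rw [ih]
    have hw : pvSpecF (c :: rest) w s = pvSpecF (c :: rest) w2 false := by
      rw [hw2]; simp [pvSpecF, hc]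
    rw [hw, specF_word_run rest c w2 hc]

theorem foldA_eq_specF : ∀ (l : List Char) (k : Nat) (out : List Int) (w : Int) (prev : Bool),
    k ≤ out.length → out.drop k = List.replicate l.length (0 : Int) →
    ((PySem.List.enumerate l (k : Int)).foldl
      (fun (st : List Int × Int × Bool) (p : Int × Char) =>
        if p.2 == ' ' then (st.1, st.2.1, true)
        else
          let w := if st.2.2 then st.2.1 + 1 else st.2.1
          (PySem.List.pySetD st.1 p.1 w, w, false))
      (out, w, prev)).1 = out.take k ++ pvSpecF l w prev := by
  intro l
  induction l with
  | nil =>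
    intro k out w prev hk hd
    have : out.length ≤ k := by
      simpa using List.drop_eq_nil_iff.mp (by simpa using hd)
    simp [PySem.List.enumerate_nil, pvSpecF, List.take_of_length_le this]
  | cons c rest ih =>
    intro k out w prev hk hd
    have hlen : out.length = k + rest.length + 1 := by
      have h1 : (out.drop k).length = rest.length + 1 := by rw [hd]; simp
      simp at h1; omega
    have hget : out[k]? = some (0 : Int) := by
      have : (out.drop k)[0]? = out[k]? := by simp [List.getElem?_drop]
      rw [← this, hd]; simp
    rw [PySem.List.enumerate_cons]
    by_cases hc : c = ' '
    · rw [List.foldl_cons]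
      simp only [hc, beq_self_eq_true, if_true]
      have hcast : (k : Int) + 1 = ((k + 1 : Nat) : Int) := by push_cast; ring
      rw [hcast, ih (k + 1) out w true (by omega) ?_]
      · have htake : out.take (k + 1) = out.take k ++ [(0 : Int)] := by
          rw [List.take_add_one, hget]; rfl
        simp [pvSpecF, htake]
      · have : out.drop (k + 1) = List.drop 1 (out.drop k) := by
          rw [List.drop_drop]
        rw [this, hd]; simp [List.replicate_succ]
    · rw [List.foldl_cons]
      have hcb : ¬ ((c == ' ') = true) := by simpa using hc
      simp only [if_neg hcb]
      have hkl : k < out.length := by omega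
      set w' : Int := if prev then w + 1 else w with hw'
      have hset : PySem.List.pySetD out (k : Int) w' = out.set k w' := by
        simp [PySem.List.pySetD_natCast]
      have hcast : (k : Int) + 1 = ((k + 1 : Nat) : Int) := by push_cast; ring
      rw [hset, hcast, ih (k + 1) (out.set k w') w' false (by simpa using Nat.succ_le_of_lt hkl) ?_]
      · have hsplit : out.set k w' = out.take k ++ w' :: out.drop (k + 1) :=
          List.set_eq_take_cons_drop w' hkl
        have htake : (out.set k w').take (k + 1) = out.take k ++ [w'] := by
          rw [hsplit, List.take_append]
          simp [List.length_take, Nat.min_eq_left (Nat.le_of_lt hkl)]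
        rw [htake]
        simp [pvSpecF, hc, hw']
      · rw [List.drop_set]
        have : ¬ k < k + 1 → False := by omega
        rw [if_pos (by omega)]
        have h2 : out.drop (k + 1) = List.drop 1 (out.drop k) := by rw [List.drop_drop]
        rw [h2, hd]; simp [List.replicate_succ]

-- ===== VERDICT (by name: the statement is the Claim_ definition above) =====
theorem get_word_number_per_index_spec : Claim_equal_get_word_number_per_index := by
  intro text _
  unfold Spec_get_word_number_per_index get_word_number_per_index get_word_number_per_index_alt
  have hinit : (PySem.List.pyRange 0 (PySem.Str.len text) 1).map (fun _ => (0 : Int)) =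
      List.replicate text.toList.length (0 : Int) := by
    rw [List.map_const']
    congr 1
    simp [PySem.List.length_pyRange_one]
  rw [pvRunsB_eq_specF]
  simpa [hinit] using
    foldA_eq_specF text.toList 0
      ((PySem.List.pyRange 0 (PySem.Str.len text) 1).map (fun _ => (0 : Int))) 0 false
      (by simp) (by simpa using hinit)
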